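-- pv_equiv track=rewrite | github.com/doggggie/courses | algorithmicthink2-002/proj4.py | build_scoring_matrix
-- ===== SOURCE A (Python) =====
-- def build_scoring_matrix(alphabet, diag_score, off_diag_score, dash_score):
--     """
--     Input:
--         alphabet: a set of characters
--         diag_score, off_diag_score, and dash_score: three scores
--     Output:
--         a dictionary of dictionaries whose entries are indexed
--         by pairs in alphabet plus '-'. Score for dash indexed entry
--         is dash_score, score for other diagonal entries is diag_score,
--         score for other off-diagonal entries is off_diag_score.
--     """
--     subdict = {}
--     for letter in alphabet:
--         subdict[letter] = off_diag_score
--     subdict['-'] = dash_score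
--     retdict = {}
--     for letter in alphabet:
--         retdict[letter] = dict(subdict)
--         retdict[letter][letter] = diag_score
--     retdict['-'] = {'-': dash_score}
--     for letter in alphabet:
--         retdict['-'][letter] = dash_score
--     return retdict
-- ===== SOURCE B (Python) =====
-- def build_scoring_matrix(alphabet, diag_score, off_diag_score, dash_score):
--     """Grow the matrix one symbol at a time (bordering), then add the gap border."""
--     matrix = {}
--     for sym in alphabet:
--         for prev, row in matrix.items():
--             row[sym] = diag_score if prev == sym else off_diag_score
--         new_row = dict.fromkeys(matrix, off_diag_score)
--         new_row[sym] = diag_score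
--         matrix[sym] = new_row
--     for row in matrix.values():
--         row['-'] = dash_score
--     matrix['-'] = dict.fromkeys(['-', *alphabet], dash_score)
--     return matrix
-- ===== Notes on version B (the rewrite author's own statement) =====
-- stated objective: alternative
-- what changed: Replaced A's two-phase template construction (shared off-diagonal row dict, per-letter copy with a diagonal overwrite, separately assembled '-' row) by incremental bordered growth: the matrix is extended one symbol at a time with a new column on every existing row plus a new row, and finally bordered with the gap column and gap row.
import Mathlib
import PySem

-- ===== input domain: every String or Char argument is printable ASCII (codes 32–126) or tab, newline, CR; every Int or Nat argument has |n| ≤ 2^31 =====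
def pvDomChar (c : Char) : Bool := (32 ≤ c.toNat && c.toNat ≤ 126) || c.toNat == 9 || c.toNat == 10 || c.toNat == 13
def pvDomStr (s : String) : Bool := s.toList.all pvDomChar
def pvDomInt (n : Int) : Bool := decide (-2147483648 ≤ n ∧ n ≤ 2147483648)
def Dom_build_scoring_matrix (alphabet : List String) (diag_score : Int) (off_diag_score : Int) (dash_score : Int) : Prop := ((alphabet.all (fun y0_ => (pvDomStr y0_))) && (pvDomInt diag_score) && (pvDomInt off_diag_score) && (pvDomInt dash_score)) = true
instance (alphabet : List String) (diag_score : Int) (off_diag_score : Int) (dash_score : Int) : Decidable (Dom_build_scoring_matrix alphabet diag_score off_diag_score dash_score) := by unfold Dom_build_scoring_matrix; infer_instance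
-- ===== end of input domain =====

-- B replaces A's template-copy construction (shared off-diagonal row, per-letter dict copy with a
-- diagonal overwrite, separately built '-' row) by incremental growth: it extends the matrix one
-- symbol at a time with a new column and row, then borders it with the gap (objective: alternative).

-- ===== PORT A =====
-- Literal transliteration of A: build subdict (letters → off_diag, '-' → dash), copy it per
-- letter with the diagonal overwritten, then the '-' row {'-': dash} extended by a loop.
-- retdict['-'][letter] = dash_score is Dict.modify at key "-" (always present, default unused).
def build_scoring_matrix (alphabet : List String) (diag_score : Int) (off_diag_score : Int) (dash_score : Int) : List (String × List (String × Int)) :=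
  let subdict := alphabet.foldl (fun d letter => d.insert letter off_diag_score) PySem.Dict.empty
  let subdict := subdict.insert "-" dash_score
  let retdict := alphabet.foldl
    (fun r letter => r.insert letter ((subdict.insert letter diag_score)))
    (PySem.Dict.empty : PySem.Dict String (PySem.Dict String Int))
  let retdict := retdict.insert "-" (PySem.Dict.ofList [("-", dash_score)])
  let retdict := alphabet.foldl
    (fun r letter => r.modify "-" PySem.Dict.empty (fun row => row.insert letter dash_score)) retdict
  retdict.items.map (fun p => (p.1, p.2.items))

-- ===== PORT B =====
-- Transliteration of Source B: grow the letter block one symbol at a time (add the new column to every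
-- existing row — in-place value mutation over items — then append the new row), then the gap border.
-- dict.fromkeys(keys, v) is the foldl of insert over those keys.
def build_scoring_matrix_alt (alphabet : List String) (diag_score : Int) (off_diag_score : Int) (dash_score : Int) : List (String × List (String × Int)) :=
  let matrix := alphabet.foldl
    (fun m sym =>
      let m := PySem.Dict.mk (m.items.map (fun p => (p.1, p.2.insert sym (if p.1 = sym then diag_score else off_diag_score))))
      let new_row := m.keys.foldl (fun r y => r.insert y off_diag_score) PySem.Dict.empty
      let new_row := new_row.insert sym diag_score
      m.insert sym new_row)
    (PySem.Dict.empty : PySem.Dict String (PySem.Dict String Int))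
  let matrix := PySem.Dict.mk (matrix.items.map (fun p => (p.1, p.2.insert "-" dash_score)))
  let matrix := matrix.insert "-" (("-" :: alphabet).foldl (fun r y => r.insert y dash_score) PySem.Dict.empty)
  matrix.items.map (fun p => (p.1, p.2.items))

-- ===== PRECONDITION & SPEC =====
def Spec_build_scoring_matrix (alphabet : List String) (diag_score : Int) (off_diag_score : Int) (dash_score : Int) (out : List (String × List (String × Int))) : Prop := out = build_scoring_matrix_alt alphabet diag_score off_diag_score dash_score
instance (alphabet : List String) (diag_score : Int) (off_diag_score : Int) (dash_score : Int) (out : List (String × List (String × Int))) : Decidable (Spec_build_scoring_matrix alphabet diag_score off_diag_score dash_score out) := by unfold Spec_build_scoring_matrix; infer_instance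

-- ===== CLAIM (what is proved, stated in full; the proofs are below) =====
def Claim_equal_build_scoring_matrix : Prop := ∀ (alphabet : List String) (diag_score : Int) (off_diag_score : Int) (dash_score : Int), Dom_build_scoring_matrix alphabet diag_score off_diag_score dash_score → Spec_build_scoring_matrix alphabet diag_score off_diag_score dash_score (build_scoring_matrix alphabet diag_score off_diag_score dash_score)

-- ===== LEMMAS AND PROOFS =====

-- Set.add of a member is the identity.
theorem pv_add_of_mem (K : List String) (k : String) (h : k ∈ K) : PySem.Set.add K k = K := by
  simp [PySem.Set.add, PySem.Set.contains, h]

-- Set.add of a non-member appends it.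
theorem pv_add_of_not_mem (K : List String) (k : String) (h : k ∉ K) : PySem.Set.add K k = K ++ [k] := by
  simp [PySem.Set.add, PySem.Set.contains, h]

-- Set.add preserves Nodup.
theorem pv_nodup_add (K : List String) (k : String) (h : K.Nodup) : (PySem.Set.add K k).Nodup := by
  by_cases hk : k ∈ K
  · rw [pv_add_of_mem K k hk]; exact h
  · rw [pv_add_of_not_mem K k hk]
    refine List.nodup_append.2 ⟨h, List.nodup_singleton k, ?_⟩
    intro a ha b hb he
    rw [List.mem_singleton] at hb
    subst hb
    exact hk (he ▸ ha)

-- Inserting into a dict whose items are a key-indexed map: overwrite in place / append if new.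
theorem pv_insert_mk {ν : Type} (K : List String) (_hK : K.Nodup) (f : String → ν) (k : String) (v : ν) :
    (PySem.Dict.mk (K.map fun y => (y, f y))).insert k v
      = PySem.Dict.mk ((PySem.Set.add K k).map fun y => (y, if y = k then v else f y)) := by
  apply PySem.Dict.ext
  rw [PySem.Dict.items_insert]
  have hkeys : (PySem.Dict.mk (K.map fun y => (y, f y))).contains k = decide (k ∈ K) := by
    rw [PySem.Dict.contains_eq_decide_mem_keys]
    simp [PySem.Dict.keys]
  by_cases hk : k ∈ K
  · rw [hkeys]
    simp only [hk, decide_true, if_true, pv_add_of_mem K k hk, List.map_map]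
    refine List.map_congr_left (fun y _ => ?_)
    by_cases h : y = k <;> simp [h]
  · rw [hkeys]
    simp only [hk, decide_false, Bool.false_eq_true, if_false]
    rw [pv_add_of_not_mem K k hk]
    simp only [List.map_append, List.map_cons, List.map_nil]
    congr 1
    refine List.map_congr_left (fun y hy => ?_)
    have hne : y ≠ k := fun h => hk (h ▸ hy)
    simp [hne]

-- A loop of inserts whose value depends only on the key, started on a dict already of that shape.
theorem pv_foldl_insert_mk {ν : Type} (g : String → ν) (l : List String) :
    ∀ (K : List String), K.Nodup →
      l.foldl (fun r y => r.insert y (g y)) (PySem.Dict.mk (K.map fun y => (y, g y)))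
        = PySem.Dict.mk ((PySem.Set.update K l).map fun y => (y, g y)) := by
  induction l with
  | nil => intro K _; simp [PySem.Set.update]
  | cons a t ih =>
    intro K hK
    rw [List.foldl_cons, pv_insert_mk K hK g a (g a)]
    have hfun : (fun y => (y, if y = a then g a else g y)) = fun y => (y, g y) := by
      funext y; by_cases h : y = a <;> simp [h]
    rw [hfun, ih (PySem.Set.add K a) (pv_nodup_add K a hK), PySem.Set.update_cons]

-- Lookup (getD) on a key-indexed-map dict at a present key.
theorem pv_getD_mk_self {ν : Type} (K : List String) (hK : K.Nodup) (f : String → ν)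
    (k : String) (hk : k ∈ K) (d0 : ν) :
    (PySem.Dict.mk (K.map fun y => (y, f y))).getD k d0 = f k := by
  exact PySem.Dict.getD_of_mem_items (PySem.Dict.mk (K.map fun y => (y, f y)))
    (List.mem_map.2 ⟨k, hk, rfl⟩)
    (by simpa [PySem.Dict.keys, Function.comp_def] using hK) d0

-- A loop of modifys at one fixed present key folds the updates into that key's value.
theorem pv_modify_foldl_mk {ν : Type} (step : String → ν → ν) (k0 : String) (d0 : ν) (l : List String) :
    ∀ (K : List String), K.Nodup → k0 ∈ K → ∀ (f : String → ν),
      l.foldl (fun r a => r.modify k0 d0 (step a)) (PySem.Dict.mk (K.map fun y => (y, f y)))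
        = PySem.Dict.mk (K.map fun y => (y, if y = k0 then l.foldl (fun v a => step a v) (f k0) else f y)) := by
  induction l with
  | nil =>
    intro K _ _ f
    simp only [List.foldl_nil]
    congr 1
    refine List.map_congr_left (fun y _ => ?_)
    by_cases h : y = k0 <;> simp [h]
  | cons a t ih =>
    intro K hK hk0 f
    rw [List.foldl_cons]
    have hmod : (PySem.Dict.mk (K.map fun y => (y, f y))).modify k0 d0 (step a)
        = PySem.Dict.mk (K.map fun y => (y, if y = k0 then step a (f k0) else f y)) := by
      show (PySem.Dict.mk (K.map fun y => (y, f y))).insert k0 _ = _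
      rw [pv_getD_mk_self K hK f k0 hk0 d0, pv_insert_mk K hK f k0 (step a (f k0)),
        pv_add_of_mem K k0 hk0]
    rw [hmod, ih K hK hk0 (fun y => if y = k0 then step a (f k0) else f y)]
    congr 1
    refine List.map_congr_left (fun y _ => ?_)
    by_cases h : y = k0 <;> simp [h, List.foldl_cons]

-- B's growth loop: invariant — the matrix built so far is the scoring matrix of the symbols seen.
theorem pv_B_loop (diag off : Int) (l : List String) :
    ∀ (K : List String), K.Nodup →
      l.foldl
        (fun m sym =>
          let m := PySem.Dict.mk (m.items.map (fun p => (p.1, p.2.insert sym (if p.1 = sym then diag else off))))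
          let new_row := m.keys.foldl (fun r y => r.insert y off) PySem.Dict.empty
          let new_row := new_row.insert sym diag
          m.insert sym new_row)
        (PySem.Dict.mk (K.map fun x => (x, PySem.Dict.mk (K.map fun y => (y, if y = x then diag else off)))))
      = PySem.Dict.mk ((PySem.Set.update K l).map fun x =>
          (x, PySem.Dict.mk ((PySem.Set.update K l).map fun y => (y, if y = x then diag else off)))) := by
  induction l with
  | nil => intro K _; simp [PySem.Set.update]
  | cons sym t ih =>
    intro K hK
    rw [List.foldl_cons]
    have hstep :
        (let m := PySem.Dict.mk (((PySem.Dict.mk (K.map fun x => (x, PySem.Dict.mk (K.map fun y => (y, if y = x then diag else off))))).items).map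
            (fun p => (p.1, p.2.insert sym (if p.1 = sym then diag else off))))
         let new_row := m.keys.foldl (fun r y => r.insert y off) PySem.Dict.empty
         let new_row := new_row.insert sym diag
         m.insert sym new_row)
        = PySem.Dict.mk ((PySem.Set.add K sym).map fun x =>
            (x, PySem.Dict.mk ((PySem.Set.add K sym).map fun y => (y, if y = x then diag else off)))) := by
      simp only [List.map_map]
      have hm1 : ((fun p : String × PySem.Dict String Int => (p.1, p.2.insert sym (if p.1 = sym then diag else off)))
            ∘ fun x => (x, PySem.Dict.mk (K.map fun y => (y, if y = x then diag else off))))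
          = fun x => (x, PySem.Dict.mk ((PySem.Set.add K sym).map fun y => (y, if y = x then diag else off))) := by
        funext x
        simp only [Function.comp]
        rw [pv_insert_mk K hK (fun y => if y = x then diag else off) sym (if x = sym then diag else off)]
        have hval : (fun y => (y, if y = sym then (if x = sym then diag else off) else if y = x then diag else off))
            = fun y => (y, if y = x then diag else off) := by
          funext y
          by_cases hys : y = sym
          · subst hys; simp [eq_comm]
          · simp [hys]
        rw [hval]
      rw [hm1]
      have hkeys : (PySem.Dict.mk (K.map fun x =>
          (x, PySem.Dict.mk ((PySem.Set.add K sym).map fun y => (y, if y = x then diag else off))))).keys = K := by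
        simp [PySem.Dict.keys, Function.comp_def]
      rw [hkeys]
      have hupd : PySem.Set.update ([] : List String) K = K := by
        rw [PySem.Set.update_eq_append_of_disjoint [] K hK (by simp)]
        simp
      have hnr : K.foldl (fun r y => r.insert y off) PySem.Dict.empty
          = PySem.Dict.mk (K.map fun y => (y, off)) := by
        have h0 : (PySem.Dict.empty : PySem.Dict String Int)
            = PySem.Dict.mk ((([] : List String)).map fun y => (y, off)) := rfl
        rw [h0, pv_foldl_insert_mk (fun _ => off) K [] List.nodup_nil, hupd]
      rw [hnr, pv_insert_mk K hK (fun _ => off) sym diag,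
        pv_insert_mk K hK
          (fun x => PySem.Dict.mk ((PySem.Set.add K sym).map fun y => (y, if y = x then diag else off)))
          sym (PySem.Dict.mk ((PySem.Set.add K sym).map fun y => (y, if y = sym then diag else off)))]
      congr 1
      refine List.map_congr_left (fun x _ => ?_)
      by_cases hx : x = sym <;> simp [hx]
    rw [hstep, ih (PySem.Set.add K sym) (pv_nodup_add K sym hK), PySem.Set.update_cons]

-- ===== VERDICT (by name: the statement is the Claim_ definition above) =====
theorem build_scoring_matrix_spec : Claim_equal_build_scoring_matrix := by
  intro alphabet diag off dash _
  unfold Spec_build_scoring_matrix build_scoring_matrix build_scoring_matrix_alt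
  simp only []
  have hS : (PySem.Set.update ([] : List String) alphabet).Nodup := by
    rw [PySem.Set.update_nil_left]; exact PySem.Set.nodup_ofList alphabet
  have hKD : (PySem.Set.add (PySem.Set.update ([] : List String) alphabet) "-").Nodup :=
    pv_nodup_add _ _ hS
  have hdashmem : "-" ∈ PySem.Set.add (PySem.Set.update ([] : List String) alphabet) "-" := by
    by_cases h : "-" ∈ PySem.Set.update ([] : List String) alphabet
    · rw [pv_add_of_mem _ _ h]; exact h
    · rw [pv_add_of_not_mem _ _ h]; simp
  -- B side: growth loop, border, gap row, final insert
  conv_rhs => rw [show (PySem.Dict.empty : PySem.Dict String (PySem.Dict String Int)) = PySem.Dict.mk ((([] : List String)).map fun x => (x, PySem.Dict.mk ((([] : List String)).map fun y => (y, if y = x then diag else off)))) from rfl,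
    pv_B_loop diag off alphabet [] List.nodup_nil]
  conv_rhs => rw [List.map_map]
  have hborder : ((fun p : String × PySem.Dict String Int => (p.1, p.2.insert "-" dash)) ∘ (fun x => (x, PySem.Dict.mk ((PySem.Set.update ([] : List String) alphabet).map fun y => (y, if y = x then diag else off)))))
      = fun x => (x, PySem.Dict.mk ((PySem.Set.add (PySem.Set.update ([] : List String) alphabet) "-").map fun y => (y, if y = "-" then dash else if y = x then diag else off))) := by
    funext x
    simp only [Function.comp]
    rw [pv_insert_mk _ hS (fun y => if y = x then diag else off) "-" dash]
  conv_rhs => rw [hborder]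
  have hdashrow : ("-" :: alphabet).foldl (fun r y => r.insert y dash) PySem.Dict.empty
      = PySem.Dict.mk ((PySem.Set.update (["-"] : List String) alphabet).map fun y => (y, dash)) := by
    rw [show (PySem.Dict.empty : PySem.Dict String Int) = PySem.Dict.mk ((([] : List String)).map fun y => (y, dash)) from rfl,
      pv_foldl_insert_mk (fun _ => dash) ("-" :: alphabet) [] List.nodup_nil,
      PySem.Set.update_cons,
      show PySem.Set.add ([] : List String) "-" = ["-"] from rfl]
  conv_rhs => rw [hdashrow,
    pv_insert_mk _ hS (fun x => PySem.Dict.mk ((PySem.Set.add (PySem.Set.update ([] : List String) alphabet) "-").map fun y => (y, if y = "-" then dash else if y = x then diag else off))) "-" (PySem.Dict.mk ((PySem.Set.update (["-"] : List String) alphabet).map fun y => (y, dash)))]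
  -- A side: subdict, template copies, '-' row, modify loop
  rw [show (PySem.Dict.empty : PySem.Dict String Int) = PySem.Dict.mk ((([] : List String)).map fun y => (y, off)) from rfl,
    pv_foldl_insert_mk (fun _ => off) alphabet [] List.nodup_nil,
    pv_insert_mk _ hS (fun _ => off) "-" dash,
    show (PySem.Dict.empty : PySem.Dict String (PySem.Dict String Int)) = PySem.Dict.mk ((([] : List String)).map fun x => (x, (PySem.Dict.mk ((PySem.Set.add (PySem.Set.update ([] : List String) alphabet) "-").map fun y => (y, if y = "-" then dash else off))).insert x diag)) from rfl,
    pv_foldl_insert_mk (fun letter => (PySem.Dict.mk ((PySem.Set.add (PySem.Set.update ([] : List String) alphabet) "-").map fun y => (y, if y = "-" then dash else off))).insert letter diag) alphabet [] List.nodup_nil,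
    pv_insert_mk _ hS (fun x => (PySem.Dict.mk ((PySem.Set.add (PySem.Set.update ([] : List String) alphabet) "-").map fun y => (y, if y = "-" then dash else off))).insert x diag) "-" (PySem.Dict.ofList [("-", dash)]),
    pv_modify_foldl_mk (fun letter row => row.insert letter dash) "-" (PySem.Dict.mk ((([] : List String)).map fun y => (y, off))) alphabet _ hKD hdashmem (fun x => if x = "-" then PySem.Dict.ofList [("-", dash)] else (PySem.Dict.mk ((PySem.Set.add (PySem.Set.update ([] : List String) alphabet) "-").map fun y => (y, if y = "-" then dash else off))).insert x diag)]
  -- now both sides are items-maps over the same key list: compare pointwise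
  congr 1
  show List.map _ _ = List.map _ _
  refine List.map_congr_left (fun x hx => ?_)
  by_cases hxd : x = "-"
  · subst hxd
    simp only [↓reduceIte]
    have hof : PySem.Dict.ofList [("-", dash)] = PySem.Dict.mk (((["-"] : List String)).map fun y => (y, dash)) := rfl
    rw [hof, pv_foldl_insert_mk (fun _ => dash) alphabet ["-"] (List.nodup_singleton "-")]
  · simp only [if_neg hxd]
    have hxS : x ∈ PySem.Set.update ([] : List String) alphabet := by
      rcases (PySem.Set.mem_add _ _ _).1 hx with h | h
      · exact h
      · exact absurd h hxd
    have hxKD : x ∈ PySem.Set.add (PySem.Set.update ([] : List String) alphabet) "-" := hx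
    suffices hrow : (PySem.Dict.mk ((PySem.Set.add (PySem.Set.update ([] : List String) alphabet) "-").map fun y => (y, if y = "-" then dash else off))).insert x diag
        = PySem.Dict.mk ((PySem.Set.add (PySem.Set.update ([] : List String) alphabet) "-").map fun y => (y, if y = "-" then dash else if y = x then diag else off)) by
      rw [hrow]
    rw [pv_insert_mk _ hKD (fun y => if y = "-" then dash else off) x diag, pv_add_of_mem _ x hxKD]
    have hval : (fun y => (y, if y = x then diag else if y = "-" then dash else off))
        = fun y => (y, if y = "-" then dash else if y = x then diag else off) := by
      funext y
      by_cases hy : y = "-"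
      · subst hy; simp [Ne.symm hxd]
      · simp [hy]
    rw [hval]
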